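-- pv_equiv track=rewrite | github.com/dp-yuanyn/virtual-screening-workflow | tools/stdio.py | _split_sdf_content
-- ===== SOURCE A (Python) =====
-- from typing import Optional, List, Dict
--
-- def _split_sdf_content(sdf_content:str) -> List[str]:
--     content_list = []
--     curr_conf_content = ""
--     for line in sdf_content.split("\n"):
--         curr_conf_content += line + "\n"
--         if line.startswith("$$$$"):
--             content_list.append(curr_conf_content)
--             curr_conf_content = ""
--     return content_list
-- ===== SOURCE B (Python) =====
-- from typing import List
--
-- def _split_sdf_content(sdf_content: str) -> List[str]:
--     lines = sdf_content.split("\n")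
--     bounds = [i for i, line in enumerate(lines) if line.startswith("$$$$")]
--     records = []
--     start = 0
--     for i in bounds:
--         records.append("\n".join(lines[start:i + 1]) + "\n")
--         start = i + 1
--     return records
-- ===== Notes on version B (the rewrite author's own statement) =====
-- stated objective: alternative
-- what changed: Replaces A's accumulate-and-flush scan (growing a string record and resetting it at each $$$$ line) with an index-then-slice strategy: split into lines once, collect the delimiter line indices, then build each record by slicing the line list between consecutive boundaries and joining.
import Mathlib
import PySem

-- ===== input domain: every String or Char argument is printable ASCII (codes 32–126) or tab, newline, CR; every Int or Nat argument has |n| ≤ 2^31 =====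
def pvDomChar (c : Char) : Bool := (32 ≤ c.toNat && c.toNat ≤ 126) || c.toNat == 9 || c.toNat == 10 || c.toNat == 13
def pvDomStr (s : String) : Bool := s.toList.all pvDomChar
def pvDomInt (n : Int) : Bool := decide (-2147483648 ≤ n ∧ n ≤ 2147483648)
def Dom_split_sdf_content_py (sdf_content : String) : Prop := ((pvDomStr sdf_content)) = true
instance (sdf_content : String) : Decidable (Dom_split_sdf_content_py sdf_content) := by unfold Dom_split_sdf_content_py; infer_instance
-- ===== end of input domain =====

-- B replaces A's accumulate-and-flush string scan with split-lines / collect delimiter indices / slice-and-join; same records, no speed claim.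

-- ===== PORT A =====
-- loop body of A: curr += line + "\n"; flush on a line starting with "$$$$"
def pvStepA (st : List String × String) (line : String) : List String × String :=
  if PySem.Str.startswith line "$$$$" then (st.1 ++ [st.2 ++ line ++ "\n"], "")
  else (st.1, st.2 ++ line ++ "\n")

def split_sdf_content_py (sdf_content : String) : List String :=
  (((PySem.Str.split? sdf_content "\n").getD []).foldl pvStepA ([], "")).1

-- ===== PORT B =====
-- loop body of B: append "\n".join(lines[start:i+1]) + "\n", set start = i+1
def pvStepB (lines : List String) (st : List String × Int) (i : Int) : List String × Int :=
  (st.1 ++ [PySem.Str.join "\n" (PySem.List.slice lines (some st.2) (some (i + 1))) ++ "\n"], i + 1)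

def split_sdf_content_py_alt (sdf_content : String) : List String :=
  let lines := (PySem.Str.split? sdf_content "\n").getD []
  let bounds := (PySem.List.enumerate lines).filterMap
      (fun p => if PySem.Str.startswith p.2 "$$$$" then some p.1 else none)
  (bounds.foldl (pvStepB lines) ([], 0)).1

-- ===== PRECONDITION & SPEC =====
def Spec_split_sdf_content_py (sdf_content : String) (out : List String) : Prop := out = split_sdf_content_py_alt sdf_content
instance (sdf_content : String) (out : List String) : Decidable (Spec_split_sdf_content_py sdf_content out) := by unfold Spec_split_sdf_content_py; infer_instance

-- ===== CLAIM (what is proved, stated in full; the proofs are below) =====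
def Claim_equal_split_sdf_content_py : Prop := ∀ (sdf_content : String), Dom_split_sdf_content_py sdf_content → Spec_split_sdf_content_py sdf_content (split_sdf_content_py sdf_content)

-- ===== LEMMAS AND PROOFS =====

-- A's scan, with the flushed records pulled out of the accumulator
def pvGoA : List String → String → List String
  | [], _ => []
  | l :: ls, cur =>
    if PySem.Str.startswith l "$$$$" then (cur ++ l ++ "\n") :: pvGoA ls "" else pvGoA ls (cur ++ l ++ "\n")

-- the same scan keeping the pending chunk as a list of lines
def pvGoB : List String → List String → List String
  | [], _ => []
  | l :: ls, chunk =>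
    if PySem.Str.startswith l "$$$$" then
      (PySem.Str.join "\n" (chunk ++ [l]) ++ "\n") :: pvGoB ls []
    else pvGoB ls (chunk ++ [l])

-- delimiter indices of ls, the first line having index k
def pvBounds : Int → List String → List Int
  | _, [] => []
  | k, l :: ls => if PySem.Str.startswith l "$$$$" then k :: pvBounds (k + 1) ls else pvBounds (k + 1) ls

def pvStrOf (chunk : List String) : String :=
  chunk.foldl (fun acc l => acc ++ l ++ "\n") ""

def pvFlat (cs : List (List Char)) : List Char :=
  (cs.map (fun c => c ++ ['\n'])).flatten

lemma pvNlToList : "\n".toList = ['\n'] := rfl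

lemma pvJoinConsNeNil (sep p : List Char) (qs : List (List Char)) (h : qs ≠ []) :
    PySem.Chars.join sep (p :: qs) = p ++ sep ++ PySem.Chars.join sep qs := by
  cases qs with
  | nil => exact absurd rfl h
  | cons q rest => exact PySem.Chars.join_cons_cons sep p q rest

lemma pvJoinFlat (cs : List (List Char)) (l : List Char) :
    PySem.Chars.join ['\n'] (cs ++ [l]) ++ ['\n'] = pvFlat cs ++ l ++ ['\n'] := by
  induction cs with
  | nil => simp [PySem.Chars.join_singleton, pvFlat]
  | cons c cs ih =>
    rw [List.cons_append, pvJoinConsNeNil ['\n'] c (cs ++ [l]) (by simp)]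
    simp only [pvFlat, List.map_cons, List.flatten_cons] at *
    simp [ih, List.append_assoc]

lemma pvStrOfToList (chunk : List String) :
    (pvStrOf chunk).toList = pvFlat (chunk.map String.toList) := by
  suffices h : ∀ (acc : String), (chunk.foldl (fun acc l => acc ++ l ++ "\n") acc).toList
      = acc.toList ++ pvFlat (chunk.map String.toList) by
    simpa [pvStrOf] using h ""
  induction chunk with
  | nil => intro acc; simp [pvFlat]
  | cons c cs ih =>
    intro acc
    simp only [List.foldl_cons, ih, pvFlat, List.map_cons, List.flatten_cons]
    simp [String.toList_append, pvNlToList, List.append_assoc]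

-- the flushed record of goB equals the flushed record of goA
lemma pvRecordEq (chunk : List String) (l : String) :
    PySem.Str.join "\n" (chunk ++ [l]) ++ "\n" = pvStrOf chunk ++ l ++ "\n" := by
  apply String.toList_inj.mp
  simp only [String.toList_append, PySem.Str.join, String.toList_ofList, pvNlToList,
    List.map_append, List.map_cons, List.map_nil, pvStrOfToList]
  simpa using pvJoinFlat (chunk.map String.toList) l.toList

lemma pvGoAB (ls : List String) : ∀ (chunk : List String), pvGoA ls (pvStrOf chunk) = pvGoB ls chunk := by
  induction ls with
  | nil => intro chunk; rfl
  | cons l ls ih =>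
    intro chunk
    by_cases h : PySem.Str.startswith l "$$$$"
    · simp only [pvGoA, pvGoB, if_pos h]
      rw [pvRecordEq, show ("" : String) = pvStrOf [] from rfl, ih]
    · simp only [pvGoA, pvGoB, if_neg h]
      rw [show pvStrOf chunk ++ l ++ "\n" = pvStrOf (chunk ++ [l]) by simp [pvStrOf], ih]

lemma pvFoldA (ls : List String) : ∀ (acc : List String) (cur : String),
    (ls.foldl pvStepA (acc, cur)).1 = acc ++ pvGoA ls cur := by
  induction ls with
  | nil => intro acc cur; simp [pvGoA]
  | cons l ls ih =>
    intro acc cur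
    rw [List.foldl_cons]
    by_cases h : PySem.Str.startswith l "$$$$" = true
    · rw [show pvStepA (acc, cur) l = (acc ++ [cur ++ l ++ "\n"], "") by
        simp only [pvStepA, if_pos h], ih]
      simp only [pvGoA, if_pos h]
      simp
    · rw [show pvStepA (acc, cur) l = (acc, cur ++ l ++ "\n") by
        simp only [pvStepA, if_neg h], ih]
      simp only [pvGoA, if_neg h]

lemma pvEnumBounds (ls : List String) : ∀ (k : Int),
    (PySem.List.enumerate ls k).filterMap
        (fun p => if PySem.Str.startswith p.2 "$$$$" then some p.1 else none) = pvBounds k ls := by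
  induction ls with
  | nil => intro k; simp [PySem.List.enumerate_nil, pvBounds]
  | cons l ls ih =>
    intro k
    rw [PySem.List.enumerate_cons, List.filterMap_cons]
    by_cases h : PySem.Str.startswith l "$$$$" = true
    · simp only [if_pos h, ih, pvBounds]
    · simp only [if_neg h, ih, pvBounds]

lemma pvDropElem (full : List String) (k : Nat) (l : String) (ls : List String)
    (h : full.drop k = l :: ls) : full[k]? = some l := by
  have h0 : (full.drop k)[0]? = some l := by rw [h]; rfl
  rwa [List.getElem?_drop, Nat.add_zero] at h0

lemma pvTakeSucc (full : List String) (s k : Nat) (l : String) (ls : List String)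
    (hs : s ≤ k) (h : full.drop k = l :: ls) :
    (full.drop s).take (k + 1 - s) = (full.drop s).take (k - s) ++ [l] := by
  have h1 : (full.drop s)[k - s]? = some l := by
    rw [List.getElem?_drop]
    have : s + (k - s) = k := by omega
    rw [this]; exact pvDropElem full k l ls h
  have h2 : k + 1 - s = (k - s) + 1 := by omega
  rw [h2, List.take_add_one, h1]
  rfl

lemma pvMain (full : List String) : ∀ (ls : List String) (s k : Nat) (res : List String),
    s ≤ k → full.drop k = ls →
    ((pvBounds (k : Int) ls).foldl (pvStepB full) (res, (s : Int))).1
      = res ++ pvGoB ls ((full.drop s).take (k - s)) := by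
  intro ls
  induction ls with
  | nil => intro s k res _ _; simp [pvBounds, pvGoB]
  | cons l ls ih =>
    intro s k res hs hdrop
    have hdrop' : full.drop (k + 1) = ls := by
      rw [← List.tail_drop, hdrop]
      rfl
    have hc : ((k : Int) + 1) = ((k + 1 : Nat) : Int) := by push_cast; ring
    by_cases h : PySem.Str.startswith l "$$$$" = true
    · simp only [pvBounds, if_pos h, List.foldl_cons]
      have hslice : PySem.List.slice full (some ((s : Nat) : Int)) (some (((k + 1 : Nat)) : Int))
          = (full.drop s).take (k + 1 - s) := PySem.List.slice_natCast full s (k + 1)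
      have hstep : pvStepB full (res, (s : Int)) (k : Int)
          = (res ++ [PySem.Str.join "\n" ((full.drop s).take (k - s) ++ [l]) ++ "\n"], ((k + 1 : Nat) : Int)) := by
        simp only [pvStepB, hc]
        rw [hslice, pvTakeSucc full s k l ls hs hdrop]
      rw [hstep, hc, ih (k + 1) (k + 1) _ (le_refl _) hdrop']
      simp only [pvGoB, if_pos h, Nat.sub_self, List.take_zero]
      simp
    · simp only [pvBounds, if_neg h]
      rw [hc, ih s (k + 1) res (by omega) hdrop']
      rw [pvTakeSucc full s k l ls hs hdrop]
      simp only [pvGoB, if_neg h]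

-- ===== VERDICT (by name: the statement is the Claim_ definition above) =====
theorem split_sdf_content_py_spec : Claim_equal_split_sdf_content_py := by
  intro sdf _
  show split_sdf_content_py sdf = split_sdf_content_py_alt sdf
  have ha : split_sdf_content_py sdf
      = (((PySem.Str.split? sdf "\n").getD []).foldl pvStepA ([], "")).1 := rfl
  have hb : split_sdf_content_py_alt sdf
      = (((PySem.List.enumerate ((PySem.Str.split? sdf "\n").getD [])).filterMap
            (fun p => if PySem.Str.startswith p.2 "$$$$" then some p.1 else none)).foldl
          (pvStepB ((PySem.Str.split? sdf "\n").getD [])) ([], ((0 : Nat) : Int))).1 := rfl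
  rw [ha, hb]
  generalize (PySem.Str.split? sdf "\n").getD [] = lines
  rw [pvFoldA lines [] "", pvEnumBounds lines 0,
    show (0 : Int) = ((0 : Nat) : Int) from rfl,
    pvMain lines lines 0 0 [] (le_refl _) rfl]
  simp only [List.nil_append, Nat.sub_zero, List.drop_zero, List.take_zero]
  rw [show ("" : String) = pvStrOf [] from rfl, pvGoAB lines []]
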